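-- pv_equiv track=rewrite | github.com/lucifer1004/xiuxian-artisan-workshop | scripts/run_real_metal_test.py | resolve_requested_device
-- ===== SOURCE A (Python) =====
-- def resolve_requested_device(argv: list[str]) -> str:
--     requested: str | None = None
--     for arg in argv:
--         if arg == "--cpu":
--             device = "cpu"
--         elif arg == "--cuda":
--             device = "cuda"
--         else:
--             continue
--         if requested is not None and requested != device:
--             raise ValueError("Choose only one of --cpu or --cuda; omit both for Metal.")
--         requested = device
--     return requested or "metal"
-- ===== SOURCE B (Python) =====
-- def resolve_requested_device(argv: list[str]) -> str:
--     has_cpu = "--cpu" in argv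
--     has_cuda = "--cuda" in argv
--     if has_cpu and has_cuda:
--         raise ValueError("Choose only one of --cpu or --cuda; omit both for Metal.")
--     return "cpu" if has_cpu else ("cuda" if has_cuda else "metal")
-- ===== Notes on version B (the rewrite author's own statement) =====
-- stated objective: simpler
-- what changed: B eliminates A's token-mapping loop with a running accumulator and per-iteration conflict check entirely: it asks two direct membership questions ('--cpu' in argv, '--cuda' in argv) and decides from those two booleans.
import Mathlib
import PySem

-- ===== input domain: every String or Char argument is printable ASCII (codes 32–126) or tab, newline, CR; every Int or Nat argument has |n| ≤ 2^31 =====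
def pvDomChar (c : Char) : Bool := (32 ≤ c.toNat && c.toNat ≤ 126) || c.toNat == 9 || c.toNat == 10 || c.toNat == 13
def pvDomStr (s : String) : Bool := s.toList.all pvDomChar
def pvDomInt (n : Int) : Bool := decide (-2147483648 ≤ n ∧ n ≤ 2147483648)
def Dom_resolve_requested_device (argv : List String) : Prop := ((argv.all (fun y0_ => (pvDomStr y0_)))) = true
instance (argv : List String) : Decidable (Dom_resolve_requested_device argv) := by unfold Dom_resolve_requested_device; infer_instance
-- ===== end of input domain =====

-- B drops A's scanning loop with its running accumulator and per-iteration conflict check,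
-- deciding instead from two direct membership tests; equal cost, simpler.

-- ===== PORT A =====
-- A's for-loop: accumulator 'requested'; 'none' result = ValueError raised (excluded by Pre_).
def resolveLoopA : Option String → List String → Option (Option String)
  | req, [] => some req
  | req, arg :: rest =>
    if arg = "--cpu" then
      match req with
      | some r => if r ≠ "cpu" then none else resolveLoopA (some "cpu") rest
      | none => resolveLoopA (some "cpu") rest
    else if arg = "--cuda" then
      match req with
      | some r => if r ≠ "cuda" then none else resolveLoopA (some "cuda") rest
      | none => resolveLoopA (some "cuda") rest
    else resolveLoopA req rest

def resolve_requested_device (argv : List String) : String :=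
  match resolveLoopA none argv with
  | some (some r) => r
  | some none => "metal"
  | none => "metal"  -- unreachable under Pre_ (Python raises ValueError here)

-- ===== PORT B =====
def resolve_requested_device_alt (argv : List String) : String :=
  let has_cpu := argv.contains "--cpu"
  let has_cuda := argv.contains "--cuda"
  -- the conflict branch (Python raise) is unreachable under Pre_
  if has_cpu && has_cuda then "metal"
  else if has_cpu then "cpu" else if has_cuda then "cuda" else "metal"

-- ===== PRECONDITION & SPEC =====
-- Pre_ excludes exactly the inputs containing both "--cpu" and "--cuda", on which both A and B raise ValueError.
def Pre_resolve_requested_device (argv : List String) : Prop :=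
  ¬ ("--cpu" ∈ argv ∧ "--cuda" ∈ argv)
instance (argv : List String) : Decidable (Pre_resolve_requested_device argv) := by
  unfold Pre_resolve_requested_device; infer_instance

def pvWitness_resolve_requested_device : List String := ["run", "--cpu", "--cpu"]

def Spec_resolve_requested_device (argv : List String) (out : String) : Prop := out = resolve_requested_device_alt argv
instance (argv : List String) (out : String) : Decidable (Spec_resolve_requested_device argv out) := by unfold Spec_resolve_requested_device; infer_instance

-- ===== CLAIM =====
def Claim_equal_resolve_requested_device : Prop := ∀ (argv : List String), Dom_resolve_requested_device argv → Pre_resolve_requested_device argv → Spec_resolve_requested_device argv (resolve_requested_device argv)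

-- ===== LEMMAS AND PROOFS =====

-- A's loop when "--cuda" never occurs
theorem loopA_no_cuda (argv : List String) (acc : Option String)
    (hacc : acc = none ∨ acc = some "cpu")
    (h : "--cuda" ∉ argv) :
    resolveLoopA acc argv = some (if "--cpu" ∈ argv then some "cpu" else acc) := by
  induction argv generalizing acc with
  | nil => simp [resolveLoopA]
  | cons a rest ih =>
    simp only [List.mem_cons, not_or] at h
    by_cases h1 : a = "--cpu"
    · subst h1
      rcases hacc with h' | h' <;> subst h' <;>
        simp [resolveLoopA, ih (some "cpu") (Or.inr rfl) h.2]
    · have h2 : a ≠ "--cuda" := fun hh => h.1 hh.symm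
      have h1' : ¬ ("--cpu" = a) := fun hh => h1 hh.symm
      simp [resolveLoopA, h1, h2, h1', ih acc hacc h.2]

-- A's loop when "--cpu" never occurs
theorem loopA_no_cpu (argv : List String) (acc : Option String)
    (hacc : acc = none ∨ acc = some "cuda")
    (h : "--cpu" ∉ argv) :
    resolveLoopA acc argv = some (if "--cuda" ∈ argv then some "cuda" else acc) := by
  induction argv generalizing acc with
  | nil => simp [resolveLoopA]
  | cons a rest ih =>
    simp only [List.mem_cons, not_or] at h
    by_cases h2 : a = "--cuda"
    · subst h2
      rcases hacc with h' | h' <;> subst h' <;>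
        simp [resolveLoopA, ih (some "cuda") (Or.inr rfl) h.2]
    · have h1 : a ≠ "--cpu" := fun hh => h.1 hh.symm
      have h2' : ¬ ("--cuda" = a) := fun hh => h2 hh.symm
      simp [resolveLoopA, h1, h2, h2', ih acc hacc h.2]

-- ===== VERDICT =====
theorem resolve_requested_device_spec : Claim_equal_resolve_requested_device := by
  intro argv _ hpre
  unfold Spec_resolve_requested_device resolve_requested_device_alt
  unfold Pre_resolve_requested_device at hpre
  unfold resolve_requested_device
  by_cases hcpu : "--cpu" ∈ argv
  · have hcuda : "--cuda" ∉ argv := fun h => hpre ⟨hcpu, h⟩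
    rw [loopA_no_cuda argv none (Or.inl rfl) hcuda]
    simp [hcpu, hcuda]
  · rw [loopA_no_cpu argv none (Or.inl rfl) hcpu]
    by_cases hcuda : "--cuda" ∈ argv <;> simp [hcpu, hcuda]
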